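-- pv_equiv track=rewrite | github.com/lscu130/Warden | scripts/capture/capture_url_v6_optimized_v6_2_plus_labels_brandlex.py | _group_status_counts
-- ===== SOURCE A (Python) =====
-- from collections import Counter
-- from typing import Dict, Iterator, List, Optional, Tuple
--
-- def _group_status_counts(status_counter: Counter) -> Dict[str, int]:
--     out = {"2xx": 0, "3xx": 0, "4xx": 0, "5xx": 0, "other": 0}
--     for status, count in status_counter.items():
--         try:
--             s = int(status)
--         except Exception:
--             out["other"] += count
--             continue
--         if 200 <= s < 300:
--             out["2xx"] += count
--         elif 300 <= s < 400:
--             out["3xx"] += count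
--         elif 400 <= s < 500:
--             out["4xx"] += count
--         elif 500 <= s < 600:
--             out["5xx"] += count
--         else:
--             out["other"] += count
--     return out
-- ===== SOURCE B (Python) =====
-- def _group_status_counts(status_counter):
--     labels = ("2xx", "3xx", "4xx", "5xx", "other")
--
--     def bucket(status):
--         try:
--             b = int(status) // 100
--         except Exception:
--             return "other"
--         return f"{b}xx" if 2 <= b <= 5 else "other"
--
--     tagged = [(bucket(status), count) for status, count in status_counter.items()]
--     return {lab: sum(c for b, c in tagged if b == lab) for lab in labels}
-- ===== Notes on version B (the rewrite author's own statement) =====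
-- stated objective: alternative
-- what changed: Replaces A's four-way elif chain of range tests updating a dict in one accumulation loop with a map of each status to a bucket label via s//100 followed by one per-label sum over the tagged list.
import Mathlib
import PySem

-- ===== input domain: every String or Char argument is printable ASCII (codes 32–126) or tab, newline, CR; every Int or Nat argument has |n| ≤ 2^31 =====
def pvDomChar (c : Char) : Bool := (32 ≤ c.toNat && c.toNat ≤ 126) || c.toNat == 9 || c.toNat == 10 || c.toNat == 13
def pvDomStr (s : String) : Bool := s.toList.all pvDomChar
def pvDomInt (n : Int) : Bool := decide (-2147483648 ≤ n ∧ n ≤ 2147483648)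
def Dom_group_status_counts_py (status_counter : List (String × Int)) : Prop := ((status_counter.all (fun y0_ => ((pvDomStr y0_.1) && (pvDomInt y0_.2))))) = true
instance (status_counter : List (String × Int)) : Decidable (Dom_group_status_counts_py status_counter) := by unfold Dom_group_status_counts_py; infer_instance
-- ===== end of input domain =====

-- B replaces A's chain of four range tests with a map to bucket labels (s // 100) followed by one per-label sum; alternative decomposition, same cost.

-- ===== PORT A =====
-- one loop step of A: try int(status), then the elif chain of range tests, updating the dict
def gscStepA (d : PySem.Dict String Int) (p : String × Int) : PySem.Dict String Int :=
  match PySem.Int.ofStr? p.1 with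
  | none => d.modify "other" 0 (· + p.2)
  | some s =>
    if 200 ≤ s ∧ s < 300 then d.modify "2xx" 0 (· + p.2)
    else if 300 ≤ s ∧ s < 400 then d.modify "3xx" 0 (· + p.2)
    else if 400 ≤ s ∧ s < 500 then d.modify "4xx" 0 (· + p.2)
    else if 500 ≤ s ∧ s < 600 then d.modify "5xx" 0 (· + p.2)
    else d.modify "other" 0 (· + p.2)

def group_status_counts_py (status_counter : List (String × Int)) : List (String × Int) :=
  (status_counter.foldl gscStepA
    (PySem.Dict.ofList [("2xx", 0), ("3xx", 0), ("4xx", 0), ("5xx", 0), ("other", 0)])).items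

-- ===== PORT B =====
-- B's helper: bucket(status) = f"{int(status)//100}xx" if the quotient is 2..5 else "other"
def gscBucket (status : String) : String :=
  match PySem.Int.ofStr? status with
  | none => "other"
  | some s =>
    let b := PySem.Int.floordiv s 100
    if 2 ≤ b ∧ b ≤ 5 then PySem.Int.toStr b ++ "xx" else "other"

def group_status_counts_py_alt (status_counter : List (String × Int)) : List (String × Int) :=
  let tagged := status_counter.map (fun p => (gscBucket p.1, p.2))
  ["2xx", "3xx", "4xx", "5xx", "other"].map
    (fun lab => (lab, (tagged.filter (fun q => q.1 == lab)).foldl (fun a q => a + q.2) 0))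

-- ===== PRECONDITION & SPEC =====
def Spec_group_status_counts_py (status_counter : List (String × Int)) (out : List (String × Int)) : Prop := out = group_status_counts_py_alt status_counter
instance (status_counter : List (String × Int)) (out : List (String × Int)) : Decidable (Spec_group_status_counts_py status_counter out) := by unfold Spec_group_status_counts_py; infer_instance

-- ===== CLAIM (what is proved, stated in full; the proofs are below) =====
def Claim_equal_group_status_counts_py : Prop := ∀ (status_counter : List (String × Int)), Dom_group_status_counts_py status_counter → Spec_group_status_counts_py status_counter (group_status_counts_py status_counter)

-- ===== LEMMAS AND PROOFS =====

-- per-label total of B, expressed directly over the input list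
def gscT (lab : String) (xs : List (String × Int)) : Int :=
  ((xs.map (fun p => (gscBucket p.1, p.2))).filter (fun q => q.1 == lab)).foldl (fun a q => a + q.2) 0

lemma gscFoldl_shift (l : List (String × Int)) (a : Int) :
    l.foldl (fun a q => a + q.2) a = a + l.foldl (fun a q => a + q.2) 0 := by
  induction l generalizing a with
  | nil => simp
  | cons h t ih =>
    rw [List.foldl_cons, List.foldl_cons, ih (a + h.2), ih (0 + h.2)]; ring

lemma gscT_cons (lab : String) (p : String × Int) (xs : List (String × Int)) :
    gscT lab (p :: xs) = (if gscBucket p.1 = lab then p.2 else 0) + gscT lab xs := by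
  simp only [gscT, List.map_cons, List.filter_cons]
  by_cases h : gscBucket p.1 = lab
  · simp only [h, BEq.rfl, List.foldl_cons, if_pos]
    rw [gscFoldl_shift]; ring
  · simp [h]

-- A's loop over the canonical 5-key dict, with arbitrary current values
lemma gscLoopA (xs : List (String × Int)) : ∀ v2 v3 v4 v5 vo : Int,
    xs.foldl gscStepA (PySem.Dict.ofList [("2xx", v2), ("3xx", v3), ("4xx", v4), ("5xx", v5), ("other", vo)]) =
    PySem.Dict.ofList [("2xx", v2 + gscT "2xx" xs), ("3xx", v3 + gscT "3xx" xs),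
      ("4xx", v4 + gscT "4xx" xs), ("5xx", v5 + gscT "5xx" xs), ("other", vo + gscT "other" xs)] := by
  induction xs with
  | nil => intro v2 v3 v4 v5 vo; simp [gscT]
  | cons p t ih =>
    intro v2 v3 v4 v5 vo
    obtain ⟨st, c⟩ := p
    simp only [List.foldl_cons]
    have hstep : gscStepA (PySem.Dict.ofList [("2xx", v2), ("3xx", v3), ("4xx", v4), ("5xx", v5), ("other", vo)]) (st, c) =
        PySem.Dict.ofList [("2xx", v2 + (if gscBucket st = "2xx" then c else 0)),
          ("3xx", v3 + (if gscBucket st = "3xx" then c else 0)),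
          ("4xx", v4 + (if gscBucket st = "4xx" then c else 0)),
          ("5xx", v5 + (if gscBucket st = "5xx" then c else 0)),
          ("other", vo + (if gscBucket st = "other" then c else 0))] := by
      simp only [gscStepA]
      cases hofs : PySem.Int.ofStr? st with
      | none =>
        have hb : gscBucket st = "other" := by simp only [gscBucket, hofs]
        simp [hb, PySem.Dict.modify, PySem.Dict.ofList, PySem.Dict.update, PySem.Dict.empty, PySem.Dict.insert, PySem.Dict.contains, PySem.Dict.get?, PySem.Dict.getD, PySem.Dict.items, List.find?, List.any]
      | some s =>
        have h100 : (0:Int) < 100 := by norm_num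
        by_cases h2 : 200 ≤ s ∧ s < 300
        · have hf : PySem.Int.floordiv s 100 = 2 := by
            rw [PySem.Int.floordiv_eq_iff_of_pos h100]; omega
          have hb : gscBucket st = "2xx" := by simp only [gscBucket, hofs, hf]; decide
          simp [h2, hb, PySem.Dict.modify, PySem.Dict.ofList, PySem.Dict.update, PySem.Dict.empty, PySem.Dict.insert, PySem.Dict.contains, PySem.Dict.get?, PySem.Dict.getD, PySem.Dict.items, List.find?, List.any]
        · by_cases h3 : 300 ≤ s ∧ s < 400
          · have hf : PySem.Int.floordiv s 100 = 3 := by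
              rw [PySem.Int.floordiv_eq_iff_of_pos h100]; omega
            have hb : gscBucket st = "3xx" := by simp only [gscBucket, hofs, hf]; decide
            simp [h2, h3, hb, PySem.Dict.modify, PySem.Dict.ofList, PySem.Dict.update, PySem.Dict.empty, PySem.Dict.insert, PySem.Dict.contains, PySem.Dict.get?, PySem.Dict.getD, PySem.Dict.items, List.find?, List.any]
          · by_cases h4 : 400 ≤ s ∧ s < 500
            · have hf : PySem.Int.floordiv s 100 = 4 := by
                rw [PySem.Int.floordiv_eq_iff_of_pos h100]; omega
              have hb : gscBucket st = "4xx" := by simp only [gscBucket, hofs, hf]; decide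
              simp [h2, h3, h4, hb, PySem.Dict.modify, PySem.Dict.ofList, PySem.Dict.update, PySem.Dict.empty, PySem.Dict.insert, PySem.Dict.contains, PySem.Dict.get?, PySem.Dict.getD, PySem.Dict.items, List.find?, List.any]
            · by_cases h5 : 500 ≤ s ∧ s < 600
              · have hf : PySem.Int.floordiv s 100 = 5 := by
                  rw [PySem.Int.floordiv_eq_iff_of_pos h100]; omega
                have hb : gscBucket st = "5xx" := by simp only [gscBucket, hofs, hf]; decide
                simp [h2, h3, h4, h5, hb, PySem.Dict.modify, PySem.Dict.ofList, PySem.Dict.update, PySem.Dict.empty, PySem.Dict.insert, PySem.Dict.contains, PySem.Dict.get?, PySem.Dict.getD, PySem.Dict.items, List.find?, List.any]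
              · have hnb : ¬ (2 ≤ PySem.Int.floordiv s 100 ∧ PySem.Int.floordiv s 100 ≤ 5) := by
                  intro hh
                  have hlo := (PySem.Int.le_floordiv_iff_mul_le (b := 100) (a := s) (q := 2) h100).mp hh.1
                  have hhi : PySem.Int.floordiv s 100 < 6 := by omega
                  have := (PySem.Int.floordiv_lt_iff_lt_mul (b := 100) (a := s) (q := 6) h100).mp hhi
                  omega
                have hb : gscBucket st = "other" := by simp only [gscBucket, hofs, if_neg hnb]
                simp [h2, h3, h4, h5, hb, PySem.Dict.modify, PySem.Dict.ofList, PySem.Dict.update, PySem.Dict.empty, PySem.Dict.insert, PySem.Dict.contains, PySem.Dict.get?, PySem.Dict.getD, PySem.Dict.items, List.find?, List.any]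
    rw [hstep, ih]
    simp only [gscT_cons]
    simp [Int.add_assoc]

-- ===== VERDICT (by name: the statement is the Claim_ definition above) =====
theorem group_status_counts_py_spec : Claim_equal_group_status_counts_py := by
  intro xs _
  show group_status_counts_py xs = group_status_counts_py_alt xs
  simp only [group_status_counts_py, group_status_counts_py_alt, gscLoopA]
  simp [PySem.Dict.ofList, PySem.Dict.update, PySem.Dict.empty, PySem.Dict.insert, PySem.Dict.contains,
    PySem.Dict.get?, PySem.Dict.items, List.find?, List.any, gscT]
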